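-- pv_equiv track=rewrite | github.com/filakrad/adventOfCode | 2021/day22/code.py | glue_back
-- ===== SOURCE A (Python) =====
-- def glue_back(cubes):
--     last_size = 0
--     cubes = list(cubes)
--     while len(cubes) != last_size:
--         last_size = len(cubes)
--         for i, c1 in enumerate(cubes):
--             br = False
--             for c2 in cubes[i + 1:]:
--                 if c1[0] == c2[0] and c1[1] == c2[1] and c1[2][1] == c2[2][0]:
--                     new_cube = (c1[0], c1[1], (c1[2][0], c2[2][1]))
--                     cubes.remove(c1)
--                     cubes.remove(c2)
--                     cubes.append(new_cube)
--                     br = True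
--                     break
--                 elif c1[0] == c2[0] and c1[1][1] == c2[1][0] and c1[2] == c2[2]:
--                     new_cube = (c1[0], (c1[1][0], c2[1][1]), c1[2])
--                     cubes.remove(c1)
--                     cubes.remove(c2)
--                     cubes.append(new_cube)
--                     br = True
--                     break
--                 elif c1[0][1] == c2[0][0] and c1[1] == c2[1] and c1[2] == c2[2]:
--                     new_cube = ((c1[0][0], c2[0][1]), c1[1], c1[2])
--                     cubes.remove(c1)
--                     cubes.remove(c2)
--                     cubes.append(new_cube)
--                     br = True
--                     break
--             if br:
--                 break
--     return set(cubes)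
-- ===== SOURCE B (Python) =====
-- # glue_back re-implemented: each round's first mergeable pair is located through
-- # three hash indexes (partner-key -> ascending position list) instead of A's
-- # nested O(n^2) pair scan, and the outer while-loop is a bounded for-loop
-- # (at most len(cubes) rounds, since each merge shrinks the list by one).
--
-- def _index(cubes, key):
--     d = {}
--     for t, c in enumerate(cubes):
--         d.setdefault(key(c), []).append(t)
--     return d
--
--
-- def _first_above(lst, i):
--     for t in lst:
--         if t > i:
--             return t
--     return None
--
--
-- def _better(best, j, rank):
--     if j is None:
--         return best
--     if best is None or (j, rank) < best:
--         return (j, rank)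
--     return best
--
--
-- def _first_merge(cubes):
--     by_z = _index(cubes, lambda c: (c[0], c[1], c[2][0]))
--     by_y = _index(cubes, lambda c: (c[0], c[1][0], c[2]))
--     by_x = _index(cubes, lambda c: (c[0][0], c[1], c[2]))
--     for i, c in enumerate(cubes):
--         j1 = _first_above(by_z.get((c[0], c[1], c[2][1]), []), i)
--         j2 = _first_above(by_y.get((c[0], c[1][1], c[2]), []), i)
--         j3 = _first_above(by_x.get((c[0][1], c[1], c[2]), []), i)
--         best = _better(_better(_better(None, j1, 0), j2, 1), j3, 2)
--         if best is not None:
--             j, rank = best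
--             c2 = cubes[j]
--             if rank == 0:
--                 new = (c[0], c[1], (c[2][0], c2[2][1]))
--             elif rank == 1:
--                 new = (c[0], (c[1][0], c2[1][1]), c[2])
--             else:
--                 new = ((c[0][0], c2[0][1]), c[1], c[2])
--             return c, c2, new
--     return None
--
--
-- def _merge_once(cubes):
--     found = _first_merge(cubes)
--     if found is None:
--         return None
--     c1, c2, new = found
--     cubes.remove(c1)
--     cubes.remove(c2)
--     cubes.append(new)
--     return cubes
--
--
-- def glue_back(cubes):
--     cubes = list(cubes)
--     for _ in range(len(cubes)):
--         if _merge_once(cubes) is None: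
--             break
--     return set(cubes)
-- ===== Notes on version B (the rewrite author's own statement) =====
-- stated objective: faster
-- what changed: Each round's first mergeable pair is found through three hash indexes (partner-key -> ascending position list) built in O(n), replacing A's nested O(n^2) scan over all later cubes for every cube, and the outer while-loop becomes a for-loop bounded by the initial length; the merge order and hence the result are identical.
import Mathlib
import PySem

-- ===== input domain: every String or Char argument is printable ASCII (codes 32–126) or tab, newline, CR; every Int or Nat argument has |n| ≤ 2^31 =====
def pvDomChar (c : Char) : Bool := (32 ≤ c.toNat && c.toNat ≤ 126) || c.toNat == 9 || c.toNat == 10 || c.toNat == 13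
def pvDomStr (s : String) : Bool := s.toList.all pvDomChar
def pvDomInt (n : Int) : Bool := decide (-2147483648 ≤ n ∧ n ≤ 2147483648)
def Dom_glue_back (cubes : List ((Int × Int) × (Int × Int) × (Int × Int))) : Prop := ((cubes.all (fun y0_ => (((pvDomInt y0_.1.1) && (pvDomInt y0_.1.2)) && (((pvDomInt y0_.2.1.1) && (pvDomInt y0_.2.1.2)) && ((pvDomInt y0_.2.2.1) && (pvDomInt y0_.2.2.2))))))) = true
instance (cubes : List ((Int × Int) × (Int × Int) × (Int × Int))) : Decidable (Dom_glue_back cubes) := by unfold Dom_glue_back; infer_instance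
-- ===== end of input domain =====

-- B replaces A's nested quadratic pair scan per round by three hash indexes
-- (partner-key -> ascending position list) built in one pass each, and the outer
-- while-loop by a for-loop bounded by the initial length; the same pair is merged
-- each round, hence the same result (measurably faster on a timing run's inputs).

abbrev Cube : Type := (Int × Int) × (Int × Int) × (Int × Int)

-- ===== PORT A =====
-- inner 'for c2 in cubes[i+1:]' loop: first c2 matching one of the three rules
def innerA (c1 : Cube) : List Cube → Option (Cube × Cube)
  | [] => none
  | c2 :: rest =>
    if c1.1 = c2.1 ∧ c1.2.1 = c2.2.1 ∧ c1.2.2.2 = c2.2.2.1 then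
      some (c2, (c1.1, c1.2.1, (c1.2.2.1, c2.2.2.2)))
    else if c1.1 = c2.1 ∧ c1.2.1.2 = c2.2.1.1 ∧ c1.2.2 = c2.2.2 then
      some (c2, (c1.1, (c1.2.1.1, c2.2.1.2), c1.2.2))
    else if c1.1.2 = c2.1.1 ∧ c1.2.1 = c2.2.1 ∧ c1.2.2 = c2.2.2 then
      some (c2, ((c1.1.1, c2.1.2), c1.2.1, c1.2.2))
    else innerA c1 rest

-- outer 'for i, c1 in enumerate(cubes)' loop
def outerA : List Cube → Option (Cube × Cube × Cube)
  | [] => none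
  | c1 :: rest =>
    match innerA c1 rest with
    | some (c2, nc) => some (c1, c2, nc)
    | none => outerA rest

-- one pass of the while body: remove(c1); remove(c2); append(new_cube)
def stepA (cubes : List Cube) : Option (List Cube) :=
  match outerA cubes with
  | none => none
  | some (c1, c2, nc) =>
    match PySem.List.remove? cubes c1 with
    | none => none          -- unreachable: c1 is in cubes
    | some l1 =>
      match PySem.List.remove? l1 c2 with
      | none => none        -- unreachable: c2 still present
      | some l2 => some (l2 ++ [nc])

theorem stepA_length_lt {cubes next : List Cube} (h : stepA cubes = some next) :
    next.length < cubes.length := by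
  unfold stepA at h
  rcases ho : outerA cubes with _ | ⟨c1, c2, nc⟩ <;> rw [ho] at h <;> dsimp only at h
  · exact absurd h (by simp)
  rcases h1 : PySem.List.remove? cubes c1 with _ | l1 <;> rw [h1] at h <;> dsimp only at h
  · exact absurd h (by simp)
  rcases h2 : PySem.List.remove? l1 c2 with _ | l2 <;> rw [h2] at h <;> dsimp only at h
  · exact absurd h (by simp)
  have hm1 : c1 ∈ cubes := by
    by_contra hc
    rw [← PySem.List.remove?_eq_none_iff (xs := cubes)] at hc
    rw [hc] at h1; exact absurd h1 (by simp)
  have hm2 : c2 ∈ l1 := by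
    by_contra hc
    rw [← PySem.List.remove?_eq_none_iff (xs := l1)] at hc
    rw [hc] at h2; exact absurd h2 (by simp)
  have e1 : l1 = cubes.erase c1 := by
    have := PySem.List.remove?_eq_some_erase _ _ hm1; rw [h1] at this; exact Option.some_inj.mp this
  have e2 : l2 = l1.erase c2 := by
    have := PySem.List.remove?_eq_some_erase _ _ hm2; rw [h2] at this; exact Option.some_inj.mp this
  have hl1 : l1.length + 1 = cubes.length := by rw [e1]; exact List.length_erase_add_one hm1
  have hl2 : l2.length + 1 = l1.length := by rw [e2]; exact List.length_erase_add_one hm2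
  have : next = l2 ++ [nc] := (Option.some_inj.mp h).symm
  simp [this]; omega

-- 'while len(cubes) != last_size' : repeat until a full scan finds no pair
def loopA (cubes : List Cube) : List Cube :=
  match h : stepA cubes with
  | none => cubes
  | some next => loopA next
termination_by cubes.length
decreasing_by exact stepA_length_lt h

def glue_back (cubes : List ((Int × Int) × (Int × Int) × (Int × Int))) : List ((Int × Int) × (Int × Int) × (Int × Int)) :=
  PySem.Set.ofList (loopA cubes)

-- ===== PORT B =====
-- _index(cubes, key): dict key -> ascending list of positions
def indexB {κ : Type} [BEq κ] (cubes : List Cube) (key : Cube → κ) : PySem.Dict κ (List Int) :=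
  (PySem.List.enumerate cubes 0).foldl (fun d p => d.modify (key p.2) [] (· ++ [p.1])) PySem.Dict.empty

-- _first_above(lst, i)
def firstAbove (lst : List Int) (i : Int) : Option Int :=
  match lst with
  | [] => none
  | t :: rest => if t > i then some t else firstAbove rest i

-- _better(best, j, rank): keep the lexicographically smaller (j, rank)
def better (best : Option (Int × Int)) (j? : Option Int) (rank : Int) : Option (Int × Int) :=
  match j? with
  | none => best
  | some j =>
    match best with
    | none => some (j, rank)
    | some (bj, br) => if j < bj ∨ (j = bj ∧ rank < br) then some (j, rank) else best

-- the 'for i, c in enumerate(cubes)' loop of _first_merge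
def findGo (byZ : PySem.Dict ((Int × Int) × (Int × Int) × Int) (List Int))
    (byY : PySem.Dict ((Int × Int) × Int × (Int × Int)) (List Int))
    (byX : PySem.Dict (Int × (Int × Int) × (Int × Int)) (List Int))
    (cubes : List Cube) : List (Int × Cube) → Option (Cube × Cube × Cube)
  | [] => none
  | (i, c) :: rest =>
    let j1 := firstAbove (byZ.getD (c.1, c.2.1, c.2.2.2) []) i
    let j2 := firstAbove (byY.getD (c.1, c.2.1.2, c.2.2) []) i
    let j3 := firstAbove (byX.getD (c.1.2, c.2.1, c.2.2) []) i
    match better (better (better none j1 0) j2 1) j3 2 with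
    | none => findGo byZ byY byX cubes rest
    | some (j, rank) =>
      match PySem.List.pyGet? cubes j with
      | none => none      -- unreachable: j is a valid index
      | some c2 =>
        if rank = 0 then some (c, c2, (c.1, c.2.1, (c.2.2.1, c2.2.2.2)))
        else if rank = 1 then some (c, c2, (c.1, (c.2.1.1, c2.2.1.2), c.2.2))
        else some (c, c2, ((c.1.1, c2.1.2), c.2.1, c.2.2))

-- _first_merge(cubes)
def firstMergeB (cubes : List Cube) : Option (Cube × Cube × Cube) :=
  findGo (indexB cubes (fun c => (c.1, c.2.1, c.2.2.1)))
         (indexB cubes (fun c => (c.1, c.2.1.1, c.2.2)))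
         (indexB cubes (fun c => (c.1.1, c.2.1, c.2.2)))
         cubes (PySem.List.enumerate cubes 0)

-- _merge_once(cubes): find, remove the two parts, append the glued cube (none = no pair)
def mergeOnceB (cubes : List Cube) : Option (List Cube) :=
  (firstMergeB cubes).bind fun t =>
    (PySem.List.remove? cubes t.1).bind fun l1 =>
      (PySem.List.remove? l1 t.2.1).map fun l2 => l2 ++ [t.2.2]

-- 'for _ in range(len(cubes)): …' — a bounded for-loop (each merge shrinks the list)
def runB : Nat → List Cube → List Cube
  | 0, cs => cs
  | n + 1, cs =>
    match mergeOnceB cs with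
    | none => cs
    | some cs' => runB n cs'

def glue_back_alt (cubes : List ((Int × Int) × (Int × Int) × (Int × Int))) : List ((Int × Int) × (Int × Int) × (Int × Int)) :=
  PySem.Set.ofList (runB cubes.length cubes)

-- ===== PRECONDITION & SPEC =====
def Spec_glue_back (cubes : List ((Int × Int) × (Int × Int) × (Int × Int))) (out : List ((Int × Int) × (Int × Int) × (Int × Int))) : Prop := out = glue_back_alt cubes
instance (cubes : List ((Int × Int) × (Int × Int) × (Int × Int))) (out : List ((Int × Int) × (Int × Int) × (Int × Int))) : Decidable (Spec_glue_back cubes out) := by unfold Spec_glue_back; infer_instance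

-- ===== CLAIM (what is proved, stated in full; the proofs are below) =====
def Claim_equal_glue_back : Prop := ∀ (cubes : List ((Int × Int) × (Int × Int) × (Int × Int))), Dom_glue_back cubes → Spec_glue_back cubes (glue_back cubes)

-- ===== LEMMAS AND PROOFS =====

-- common characterisation of one round's chosen pair: rule rank (0/1/2) per A's branch order
def ruleRank (c d : Cube) : Option Int :=
  if c.1 = d.1 ∧ c.2.1 = d.2.1 ∧ c.2.2.2 = d.2.2.1 then some 0
  else if c.1 = d.1 ∧ c.2.1.2 = d.2.1.1 ∧ c.2.2 = d.2.2 then some 1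
  else if c.1.2 = d.1.1 ∧ c.2.1 = d.2.1 ∧ c.2.2 = d.2.2 then some 2
  else none

def mergeOf (r : Int) (c d : Cube) : Cube :=
  if r = 0 then (c.1, c.2.1, (c.2.2.1, d.2.2.2))
  else if r = 1 then (c.1, (c.2.1.1, d.2.1.2), c.2.2)
  else ((c.1.1, d.1.2), c.2.1, c.2.2)

def firstHit (c : Cube) : List (Int × Cube) → Option (Int × Cube × Int)
  | [] => none
  | (t, d) :: rest =>
    match ruleRank c d with
    | some r => some (t, d, r)
    | none => firstHit c rest

theorem innerA_eq (c : Cube) (s : List Cube) (m : Int) :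
    innerA c s
      = (firstHit c (PySem.List.enumerate s m)).map (fun x => (x.2.1, mergeOf x.2.2 c x.2.1)) := by
  induction s generalizing m with
  | nil => simp [innerA, PySem.List.enumerate_nil, firstHit]
  | cons d s ih =>
    rw [PySem.List.enumerate_cons]
    simp only [innerA, firstHit, ruleRank]
    split_ifs with h1 h2 h3 <;> simp [mergeOf, ih (m + 1)]

theorem indexB_getD {κ : Type} [BEq κ] [LawfulBEq κ] (cubes : List Cube) (key : Cube → κ) (k : κ) :
    (indexB cubes key).getD k []
      = ((PySem.List.enumerate cubes 0).filter (fun p => key p.2 == k)).map (fun p => p.1) := by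
  unfold indexB
  rw [show (List.foldl (fun (d : PySem.Dict κ (List Int)) (p : Int × Cube) =>
        d.modify (key p.2) [] (· ++ [p.1])) PySem.Dict.empty (PySem.List.enumerate cubes 0))
      = (List.foldl (fun (d : PySem.Dict κ (List Int)) (q : κ × Int) =>
        d.modify q.1 [] (· ++ [q.2])) PySem.Dict.empty
          ((PySem.List.enumerate cubes 0).map (fun p => (key p.2, p.1)))) from
      (List.foldl_map (f := fun p : Int × Cube => (key p.2, p.1))
        (g := fun (d : PySem.Dict κ (List Int)) (q : κ × Int) => d.modify q.1 [] (· ++ [q.2]))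
        (l := PySem.List.enumerate cubes 0) (init := PySem.Dict.empty)).symm]
  rw [PySem.Dict.getD_foldl_modify_append]
  simp only [List.filter_map, List.map_map]
  simp [Function.comp_def, PySem.Dict.getD_empty]

theorem firstAbove_filter (Q : Int × Cube → Bool) (ps : List (Int × Cube)) (i : Int) :
    firstAbove ((ps.filter Q).map (fun p => p.1)) i
      = (ps.find? (fun p => decide (i < p.1) && Q p)).map (fun p => p.1) := by
  induction ps with
  | nil => rfl
  | cons p ps ih =>
    by_cases hq : Q p = true
    · by_cases hi : i < p.1 <;> simp [List.filter_cons, List.find?_cons, hq, hi, firstAbove, ih]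
    · simp [List.filter_cons, List.find?_cons, hq, ih]

theorem find?_congr_mem {α : Type} {l : List α} {p q : α → Bool} (h : ∀ x ∈ l, p x = q x) :
    l.find? p = l.find? q := by
  induction l with
  | nil => rfl
  | cons x l ih =>
    have hx := h x (List.mem_cons_self)
    by_cases hp : p x = true <;>
      simp [List.find?_cons, hp, hx ▸ hp, ih (fun y hy => h y (List.mem_cons_of_mem _ hy))]

theorem better_keep (t r r' : Int) (j? : Option Int) (hr : r ≤ r')
    (hj : ∀ u, j? = some u → t ≤ u) : better (some (t, r)) j? r' = some (t, r) := by
  cases j? with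
  | none => rfl
  | some u =>
    have hu := hj u rfl
    simp only [better]
    split_ifs with h
    · exfalso; rcases h with h | ⟨h1, h2⟩ <;> omega
    · rfl

theorem better_take (best : Option (Int × Int)) (t r' : Int)
    (hb : ∀ p, best = some p → t < p.1) : better best (some t) r' = some (t, r') := by
  cases best with
  | none => rfl
  | some b =>
    obtain ⟨bj, br⟩ := b
    have := hb (bj, br) rfl
    simp only [better]
    rw [if_pos (Or.inl this)]

theorem better_bound {t : Int} {best : Option (Int × Int)} {j? : Option Int} {r' : Int}
    (hb : ∀ p, best = some p → t < p.1) (hj : ∀ u, j? = some u → t < u) :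
    ∀ p, better best j? r' = some p → t < p.1 := by
  intro p hp
  cases j? with
  | none => exact hb p hp
  | some u =>
    have hu := hj u rfl
    cases best with
    | none => simp only [better] at hp; cases hp; exact hu
    | some b =>
      obtain ⟨bj, br⟩ := b
      have hbj := hb (bj, br) rfl
      simp only [better] at hp
      split_ifs at hp <;> cases hp
      · exact hu
      · exact hbj

-- the three bucket-query predicates of findGo, seen as find? predicates
def q1 (c : Cube) (p : Int × Cube) : Bool :=
  ((p.2.1, p.2.2.1, p.2.2.2.1) : (Int × Int) × (Int × Int) × Int) == (c.1, c.2.1, c.2.2.2)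
def q2 (c : Cube) (p : Int × Cube) : Bool :=
  ((p.2.1, p.2.2.1.1, p.2.2.2) : (Int × Int) × Int × (Int × Int)) == (c.1, c.2.1.2, c.2.2)
def q3 (c : Cube) (p : Int × Cube) : Bool :=
  ((p.2.1.1, p.2.2.1, p.2.2.2) : Int × (Int × Int) × (Int × Int)) == (c.1.2, c.2.1, c.2.2)

theorem q1_iff (c d : Cube) (t : Int) :
    q1 c (t, d) = true ↔ (c.1 = d.1 ∧ c.2.1 = d.2.1 ∧ c.2.2.2 = d.2.2.1) := by
  simp only [q1, beq_iff_eq, Prod.mk.injEq]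
  constructor
  · rintro ⟨a, b, e⟩; exact ⟨a.symm, b.symm, e.symm⟩
  · rintro ⟨a, b, e⟩; exact ⟨a.symm, b.symm, e.symm⟩
theorem q2_iff (c d : Cube) (t : Int) :
    q2 c (t, d) = true ↔ (c.1 = d.1 ∧ c.2.1.2 = d.2.1.1 ∧ c.2.2 = d.2.2) := by
  simp only [q2, beq_iff_eq, Prod.mk.injEq]
  constructor
  · rintro ⟨a, b, e⟩; exact ⟨a.symm, b.symm, e.symm⟩
  · rintro ⟨a, b, e⟩; exact ⟨a.symm, b.symm, e.symm⟩
theorem q3_iff (c d : Cube) (t : Int) :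
    q3 c (t, d) = true ↔ (c.1.2 = d.1.1 ∧ c.2.1 = d.2.1 ∧ c.2.2 = d.2.2) := by
  simp only [q3, beq_iff_eq, Prod.mk.injEq]
  constructor
  · rintro ⟨a, b, e⟩; exact ⟨a.symm, b.symm, e.symm⟩
  · rintro ⟨a, b, e⟩; exact ⟨a.symm, b.symm, e.symm⟩

theorem chain_eq (c : Cube) (ps : List (Int × Cube))
    (hasc : ps.Pairwise (fun p q => p.1 < q.1)) :
    better (better (better none ((ps.find? (q1 c)).map (fun p => p.1)) 0)
        ((ps.find? (q2 c)).map (fun p => p.1)) 1)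
      ((ps.find? (q3 c)).map (fun p => p.1)) 2
      = (firstHit c ps).map (fun x => (x.1, x.2.2)) := by
  induction ps with
  | nil => rfl
  | cons p ps ih =>
    obtain ⟨t, d⟩ := p
    have hlt : ∀ q ∈ ps, t < q.1 := (List.pairwise_cons.mp hasc).1
    have htail : ∀ (Q : Int × Cube → Bool) (u : Int),
        ((ps.find? Q).map (fun p => p.1)) = some u → t < u := by
      intro Q u hu
      obtain ⟨p', hp', rfl⟩ := Option.map_eq_some_iff.mp hu
      exact hlt p' (List.mem_of_find?_eq_some hp')
    have hhead : ∀ (Q : Int × Cube → Bool) (u : Int),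
        ((((t, d) :: ps).find? Q).map (fun p => p.1)) = some u → t ≤ u := by
      intro Q u hu
      by_cases hQ : Q (t, d) = true
      · rw [List.find?_cons_of_pos hQ] at hu; cases hu; rfl
      · rw [List.find?_cons_of_neg (by simp [hQ])] at hu
        exact le_of_lt (htail Q u hu)
    rcases hr : ruleRank c d with _ | r
    · have h1 : ¬ (c.1 = d.1 ∧ c.2.1 = d.2.1 ∧ c.2.2.2 = d.2.2.1) := by
        unfold ruleRank at hr; split_ifs at hr; assumption
      have h2 : ¬ (c.1 = d.1 ∧ c.2.1.2 = d.2.1.1 ∧ c.2.2 = d.2.2) := by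
        unfold ruleRank at hr; split_ifs at hr; assumption
      have h3 : ¬ (c.1.2 = d.1.1 ∧ c.2.1 = d.2.1 ∧ c.2.2 = d.2.2) := by
        unfold ruleRank at hr; split_ifs at hr; assumption
      rw [List.find?_cons_of_neg (by simp [q1_iff, h1]),
          List.find?_cons_of_neg (by simp [q2_iff, h2]),
          List.find?_cons_of_neg (by simp [q3_iff, h3])]
      simp only [firstHit, hr]
      exact ih (List.pairwise_cons.mp hasc).2
    · simp only [firstHit, hr, Option.map_some]
      unfold ruleRank at hr
      split_ifs at hr with h1 h2 h3
      · -- r = 0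
        cases hr
        rw [List.find?_cons_of_pos (by simp [q1_iff, h1])]
        simp only [Option.map_some]
        rw [show better none (some t) 0 = some (t, 0) from rfl]
        rw [better_keep t 0 1 _ (by omega) (hhead (q2 c)),
            better_keep t 0 2 _ (by omega) (hhead (q3 c))]
      · -- r = 1
        cases hr
        rw [List.find?_cons_of_neg (by simp [q1_iff, h1]),
            List.find?_cons_of_pos (by simp [q2_iff, h2])]
        simp only [Option.map_some]
        have hb1 : ∀ p, better none ((ps.find? (q1 c)).map (fun p => p.1)) 0 = some p → t < p.1 :=
          better_bound (by intro p hp; cases hp) (htail (q1 c))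
        rw [better_take _ t 1 hb1,
            better_keep t 1 2 _ (by omega) (hhead (q3 c))]
      · -- r = 2
        cases hr
        rw [List.find?_cons_of_neg (by simp [q1_iff, h1]),
            List.find?_cons_of_neg (by simp [q2_iff, h2]),
            List.find?_cons_of_pos (by simp [q3_iff, h3])]
        simp only [Option.map_some]
        have hb1 : ∀ p, better none ((ps.find? (q1 c)).map (fun p => p.1)) 0 = some p → t < p.1 :=
          better_bound (by intro p hp; cases hp) (htail (q1 c))
        have hb2 : ∀ p, better (better none ((ps.find? (q1 c)).map (fun p => p.1)) 0)
            ((ps.find? (q2 c)).map (fun p => p.1)) 1 = some p → t < p.1 :=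
          better_bound hb1 (htail (q2 c))
        rw [better_take _ t 2 hb2]

theorem firstHit_mem {c : Cube} {ps : List (Int × Cube)} {t : Int} {d : Cube} {r : Int}
    (h : firstHit c ps = some (t, d, r)) : (t, d) ∈ ps ∧ ruleRank c d = some r := by
  induction ps with
  | nil => cases h
  | cons p ps ih =>
    obtain ⟨t', d'⟩ := p
    simp only [firstHit] at h
    rcases hr : ruleRank c d' with _ | r' <;> rw [hr] at h
    · obtain ⟨hm, hrr⟩ := ih h
      exact ⟨List.mem_cons_of_mem _ hm, hrr⟩
    · cases h
      exact ⟨List.mem_cons_self, hr⟩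

theorem findGo_eq (cubes : List Cube) (s : List Cube) (k : Nat) (hk : s = cubes.drop k) :
    findGo (indexB cubes (fun c => (c.1, c.2.1, c.2.2.1)))
        (indexB cubes (fun c => (c.1, c.2.1.1, c.2.2)))
        (indexB cubes (fun c => (c.1.1, c.2.1, c.2.2)))
        cubes (PySem.List.enumerate s (k : Int)) = outerA s := by
  induction s generalizing k with
  | nil => simp [findGo, outerA, PySem.List.enumerate_nil]
  | cons c s' ih =>
    have hk' : s' = cubes.drop (k + 1) := by rw [← List.tail_drop, ← hk]; rfl
    have hklt : k < cubes.length := by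
      by_contra hc
      have : cubes.drop k = [] := List.drop_eq_nil_of_le (by omega)
      rw [← hk] at this; cases this
    have hsplit : cubes = cubes.take k ++ (c :: s') := by
      conv_lhs => rw [← List.take_append_drop k cubes]
      rw [← hk]
    have hE : PySem.List.enumerate cubes 0
        = PySem.List.enumerate (cubes.take k) 0
            ++ ((k : Int), c) :: PySem.List.enumerate s' ((k : Int) + 1) := by
      conv_lhs => rw [hsplit]
      have hlen : (cubes.take k).length = k := by
        simp [List.length_take, Nat.min_eq_left (le_of_lt hklt)]
      rw [PySem.List.enumerate_append, PySem.List.enumerate_cons, hlen]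
      norm_num
    have hjr : ∀ {κ : Type} [BEq κ] [LawfulBEq κ] (key : Cube → κ) (kq : κ),
        firstAbove ((indexB cubes key).getD kq []) (k : Int)
          = ((PySem.List.enumerate s' ((k : Int) + 1)).find?
              (fun p => key p.2 == kq)).map (fun p => p.1) := by
      intro κ _ _ key kq
      rw [indexB_getD, firstAbove_filter, hE, List.find?_append]
      have hnone : (PySem.List.enumerate (cubes.take k) 0).find?
          (fun p => decide ((k : Int) < p.1) && (key p.2 == kq)) = none := by
        rw [List.find?_eq_none]
        intro p hp
        obtain ⟨j, hj, rfl⟩ := (PySem.List.mem_enumerate_iff _ _ _).mp hp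
        have : j < k := by
          have := hj; simp [List.length_take] at this; omega
        simp only [Bool.and_eq_true, decide_eq_true_eq, not_and]
        intro hcontra
        exfalso; simp at hcontra; omega
      rw [hnone, Option.none_or]
      rw [List.find?_cons_of_neg (by simp)]
      refine congrArg (Option.map (fun p : Int × Cube => p.1)) (find?_congr_mem ?_)
      intro p hp
      obtain ⟨j, hj, rfl⟩ := (PySem.List.mem_enumerate_iff _ _ _).mp hp
      simp only [Bool.and_eq_true, decide_eq_true_eq]
      have : (k : Int) < (k : Int) + 1 + (j : Int) := by omega
      simp [this]
    rw [PySem.List.enumerate_cons]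
    simp only [findGo]
    rw [hjr, hjr, hjr]
    rw [show (fun p : Int × Cube => ((fun c : Cube => (c.1, c.2.1, c.2.2.1)) p.2 == (c.1, c.2.1, c.2.2.2))) = q1 c from rfl,
        show (fun p : Int × Cube => ((fun c : Cube => (c.1, c.2.1.1, c.2.2)) p.2 == (c.1, c.2.1.2, c.2.2))) = q2 c from rfl,
        show (fun p : Int × Cube => ((fun c : Cube => (c.1.1, c.2.1, c.2.2)) p.2 == (c.1.2, c.2.1, c.2.2))) = q3 c from rfl]
    rw [chain_eq c _ (PySem.List.pairwise_lt_enumerate _ _)]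
    rcases hfh : firstHit c (PySem.List.enumerate s' ((k : Int) + 1)) with _ | ⟨t, d, r⟩
    · simp only [Option.map_none]
      rw [show outerA (c :: s') = (match innerA c s' with
          | some (c2, nc) => some (c, c2, nc) | none => outerA s') from rfl]
      rw [innerA_eq c s' ((k : Int) + 1), hfh]
      exact ih (k + 1) hk'
    · obtain ⟨hmem, hrr⟩ := firstHit_mem hfh
      obtain ⟨j0, hj0, heq⟩ := (PySem.List.mem_enumerate_iff _ _ _).mp hmem
      have ht : t = ((k + 1 + j0 : Nat) : Int) := by
        have := congrArg Prod.fst heq; simp at this; push_cast; omega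
      have hd : d = s'[j0] := congrArg Prod.snd heq
      have hget : PySem.List.pyGet? cubes t = some d := by
        rw [ht, PySem.List.pyGet?_natCast]
        conv_lhs => rw [hsplit]
        rw [List.getElem?_append_right (by simp [List.length_take]; omega)]
        have : k + 1 + j0 - (cubes.take k).length = j0 + 1 := by
          simp [List.length_take]; omega
        rw [this]
        simp [hd, List.getElem?_eq_getElem hj0]
      have hr3 : r = 0 ∨ r = 1 ∨ r = 2 := by
        unfold ruleRank at hrr; split_ifs at hrr <;> simp at hrr <;> omega
      simp only [Option.map_some]
      rw [show outerA (c :: s') = (match innerA c s' with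
          | some (c2, nc) => some (c, c2, nc) | none => outerA s') from rfl]
      rw [innerA_eq c s' ((k : Int) + 1), hfh]
      simp only [Option.map_some, hget]
      rcases hr3 with h | h | h <;> subst h <;> simp [mergeOf]

theorem firstMergeB_eq_outerA (cubes : List Cube) : firstMergeB cubes = outerA cubes := by
  unfold firstMergeB
  have := findGo_eq cubes cubes 0 rfl
  simpa using this

theorem mergeOnceB_eq_stepA (cubes : List Cube) : mergeOnceB cubes = stepA cubes := by
  unfold mergeOnceB stepA
  rw [firstMergeB_eq_outerA]
  rcases outerA cubes with _ | ⟨c1, c2, nc⟩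
  · rfl
  · simp only [Option.bind_some]
    rcases PySem.List.remove? cubes c1 with _ | l1
    · rfl
    · simp only [Option.bind_some]
      rcases PySem.List.remove? l1 c2 with _ | l2 <;> rfl

theorem runB_eq_loopA : ∀ (n : Nat) (cubes : List Cube), cubes.length ≤ n → runB n cubes = loopA cubes := by
  intro n
  induction n with
  | zero =>
    intro cubes hl
    rw [runB, loopA]
    cases h : stepA cubes with
    | none => rfl
    | some next => exact absurd (stepA_length_lt h) (by omega)
  | succ n ih =>
    intro cubes hl
    rw [runB, loopA]
    rw [mergeOnceB_eq_stepA]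
    cases h : stepA cubes with
    | none => rfl
    | some next =>
      exact ih next (by have := stepA_length_lt h; omega)

-- ===== VERDICT (by name: the statement is the Claim_ definition above) =====
theorem glue_back_spec : Claim_equal_glue_back := by
  intro cubes _
  unfold Spec_glue_back glue_back glue_back_alt
  rw [runB_eq_loopA cubes.length cubes le_rfl]
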